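-- pv_equiv track=rewrite | github.com/mjhosseini/entgraph_eval | evaluation/qaeval_utils.py | split_str_multipat
-- ===== SOURCE A (Python) =====
-- import copy
--
-- def split_str_multipat(string, patterns):
-- 	lst = [string]
-- 	new_lst = []
-- 	for pat in patterns:
-- 		for ele in lst:
-- 			new_lst += ele.split(pat)
-- 		lst = copy.deepcopy(new_lst)
-- 		new_lst = []
-- 	return lst
-- ===== SOURCE B (Python) =====
-- def split_str_multipat(string, patterns):
--     if not patterns:
--         return [string]
--     return [piece
--             for part in string.split(patterns[0])
--             for piece in split_str_multipat(part, patterns[1:])]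
-- ===== Notes on version B (the rewrite author's own statement) =====
-- stated objective: simpler
-- what changed: Replaces the two nested loops, accumulator lists and copy.deepcopy with a direct recursion over the pattern list: split by the first pattern and recurse on each piece with the remaining patterns.
import Mathlib
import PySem

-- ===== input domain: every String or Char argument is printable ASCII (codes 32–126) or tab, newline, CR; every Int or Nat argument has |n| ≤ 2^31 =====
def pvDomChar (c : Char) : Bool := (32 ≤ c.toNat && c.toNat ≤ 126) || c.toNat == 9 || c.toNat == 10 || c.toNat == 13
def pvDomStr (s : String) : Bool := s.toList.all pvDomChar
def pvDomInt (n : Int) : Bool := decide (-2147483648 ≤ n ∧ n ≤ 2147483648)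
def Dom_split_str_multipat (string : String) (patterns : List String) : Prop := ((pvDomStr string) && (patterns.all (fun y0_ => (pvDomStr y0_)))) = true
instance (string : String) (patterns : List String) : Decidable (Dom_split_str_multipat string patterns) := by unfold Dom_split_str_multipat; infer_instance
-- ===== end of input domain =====

-- B replaces A's nested loops, accumulator lists and deepcopy with a recursion over the pattern list (objective: simpler).

-- ===== PORT A =====
-- lst = [string]; for pat in patterns: new_lst = []; for ele in lst: new_lst += ele.split(pat); lst = deepcopy(new_lst)
-- (deepcopy of a list of strings is a no-op on the value).
-- ele.split(pat): exact for pat ≠ "" (guaranteed by Pre_ below); Python raises ValueError for pat = "".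
def pySplit (s sep : String) : List String := (PySem.Chars.splitOn s.toList sep.toList).map String.ofList
def split_str_multipat (string : String) (patterns : List String) : List String :=
  patterns.foldl
    (fun lst pat => lst.foldl (fun new_lst ele => new_lst ++ pySplit ele pat) [])
    [string]

-- ===== PORT B =====
def split_str_multipat_alt (string : String) (patterns : List String) : List String :=
  match patterns with
  | [] => [string]
  | pat :: rest => (pySplit string pat).flatMap (fun part => split_str_multipat_alt part rest)

-- ===== PRECONDITION & SPEC =====
-- Pre_ excludes an empty-string pattern, on which Python's str.split raises ValueError (both A and B raise there).
def Pre_split_str_multipat (string : String) (patterns : List String) : Prop := "" ∉ patterns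
instance (string : String) (patterns : List String) : Decidable (Pre_split_str_multipat string patterns) := by unfold Pre_split_str_multipat; infer_instance
def pvWitness_split_str_multipat : String × List String := ("a,b c", [",", " "])

def Spec_split_str_multipat (string : String) (patterns : List String) (out : List String) : Prop := out = split_str_multipat_alt string patterns
instance (string : String) (patterns : List String) (out : List String) : Decidable (Spec_split_str_multipat string patterns out) := by unfold Spec_split_str_multipat; infer_instance

-- ===== CLAIM (what is proved, stated in full; the proofs are below) =====
def Claim_equal_split_str_multipat : Prop := ∀ (string : String) (patterns : List String), Dom_split_str_multipat string patterns → Pre_split_str_multipat string patterns → Spec_split_str_multipat string patterns (split_str_multipat string patterns)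

-- ===== LEMMAS AND PROOFS =====

-- A's inner loop is a flatMap.
theorem inner_eq_flatMap (lst : List String) (pat : String) :
    lst.foldl (fun new_lst ele => new_lst ++ pySplit ele pat) []
      = lst.flatMap (fun ele => pySplit ele pat) := by
  simpa using PySem.List.foldl_append_eq_flatMap (fun ele => pySplit ele pat) lst []

-- A's outer fold, started from any list of pieces, is B applied piecewise.
theorem foldl_eq_alt_flatMap (patterns : List String) (lst : List String) :
    patterns.foldl
      (fun lst pat => lst.foldl (fun new_lst ele => new_lst ++ pySplit ele pat) [])
      lst
      = lst.flatMap (fun s => split_str_multipat_alt s patterns) := by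
  induction patterns generalizing lst with
  | nil => simp [split_str_multipat_alt]
  | cons pat rest ih =>
      rw [List.foldl_cons, inner_eq_flatMap, ih, List.flatMap_assoc]
      simp [split_str_multipat_alt]

-- ===== VERDICT (by name: the statement is the Claim_ definition above) =====
theorem split_str_multipat_spec : Claim_equal_split_str_multipat := by
  intro s patterns _ _
  unfold Spec_split_str_multipat split_str_multipat
  rw [foldl_eq_alt_flatMap]
  simp
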